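-- pv_equiv track=rewrite | github.com/LorenzoZ-DEV/giuautils | giuautils.py | calcola_giorni_assenza
-- ===== SOURCE A (Python) =====
-- def calcola_giorni_assenza(ore_totali):
--     giorni_completi = 0
--     ore_rimanenti = ore_totali
--
--     for giorno in ["lunedì", "martedì", "mercoledì", "giovedì", "venerdì"]:
--         if giorno == "mercoledì":
--             ore_giornaliere = 4
--         elif giorno in ["giovedì", "venerdì"]:
--             ore_giornaliere = 6
--         else:
--             ore_giornaliere = 5
--
--         if ore_rimanenti >= ore_giornaliere:
--             giorni_completi += 1
--             ore_rimanenti -= ore_giornaliere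
--         else:
--             break
--
--     return giorni_completi, ore_rimanenti
-- ===== SOURCE B (Python) =====
-- _CUM = [5, 10, 14, 20, 26]  # cumulative hours of the fixed schedule [5,5,4,6,6]
--
-- def calcola_giorni_assenza(ore_totali):
--     giorni_completi = sum(1 for c in _CUM if c <= ore_totali)
--     if giorni_completi == 0:
--         return 0, ore_totali
--     return giorni_completi, ore_totali - _CUM[giorni_completi - 1]
-- ===== Notes on version B (the rewrite author's own statement) =====
-- stated objective: simpler
-- what changed: Replaces the day-by-day subtract-or-break loop with a lookup in the precomputed cumulative-hours table [5,10,14,20,26]: the day count is the number of thresholds <= ore_totali and the remainder is one subtraction.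
import Mathlib
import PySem

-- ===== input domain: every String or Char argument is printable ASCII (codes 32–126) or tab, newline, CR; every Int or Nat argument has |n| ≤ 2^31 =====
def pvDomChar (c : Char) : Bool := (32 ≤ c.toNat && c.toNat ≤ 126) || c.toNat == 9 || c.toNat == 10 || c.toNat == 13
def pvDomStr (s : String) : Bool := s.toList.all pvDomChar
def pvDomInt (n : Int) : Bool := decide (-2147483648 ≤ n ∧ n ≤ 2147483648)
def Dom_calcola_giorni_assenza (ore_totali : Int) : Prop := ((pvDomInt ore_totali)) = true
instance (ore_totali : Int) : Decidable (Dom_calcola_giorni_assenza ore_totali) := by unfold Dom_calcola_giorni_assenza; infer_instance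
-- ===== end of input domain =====

-- B replaces A's day-by-day subtract-or-break loop with a cumulative-hours table lookup (objective: simpler); same cost, no speed claim.
-- ===== PORT A =====
-- loop body of A: walk the weekday list, taking a full day while hours remain, else break
def pvHours (giorno : String) : Int :=
  if giorno == "mercoledì" then 4
  else if giorno = "giovedì" ∨ giorno = "venerdì" then 6
  else 5

def pvLoopA : List String → Int → Int → Int × Int
  | [], giorni_completi, ore_rimanenti => (giorni_completi, ore_rimanenti)
  | giorno :: rest, giorni_completi, ore_rimanenti =>
    let ore_giornaliere := pvHours giorno
    if ore_rimanenti ≥ ore_giornaliere then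
      pvLoopA rest (giorni_completi + 1) (ore_rimanenti - ore_giornaliere)
    else (giorni_completi, ore_rimanenti)

def calcola_giorni_assenza (ore_totali : Int) : Int × Int :=
  pvLoopA ["lunedì", "martedì", "mercoledì", "giovedì", "venerdì"] 0 ore_totali

-- ===== PORT B =====
-- B: cumulative-hours table; day count = number of thresholds ≤ ore_totali
def pvCum : List Int := [5, 10, 14, 20, 26]

def calcola_giorni_assenza_alt (ore_totali : Int) : Int × Int :=
  let giorni_completi : Int := ((pvCum.filter (fun c => c ≤ ore_totali)).length : Int)
  if giorni_completi == 0 then (0, ore_totali)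
  else (giorni_completi, ore_totali - (PySem.List.pyGet? pvCum (giorni_completi - 1)).getD 0)

-- ===== PRECONDITION & SPEC =====
def Spec_calcola_giorni_assenza (ore_totali : Int) (out : Int × Int) : Prop := out = calcola_giorni_assenza_alt ore_totali
instance (ore_totali : Int) (out : Int × Int) : Decidable (Spec_calcola_giorni_assenza ore_totali out) := by unfold Spec_calcola_giorni_assenza; infer_instance

-- ===== CLAIM (what is proved, stated in full; the proofs are below) =====
def Claim_equal_calcola_giorni_assenza : Prop := ∀ (ore_totali : Int), Dom_calcola_giorni_assenza ore_totali → Spec_calcola_giorni_assenza ore_totali (calcola_giorni_assenza ore_totali)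

-- ===== LEMMAS AND PROOFS =====
theorem pvHours_lun : pvHours "lunedì" = 5 := by decide
theorem pvHours_mar : pvHours "martedì" = 5 := by decide
theorem pvHours_mer : pvHours "mercoledì" = 4 := by decide
theorem pvHours_gio : pvHours "giovedì" = 6 := by decide
theorem pvHours_ven : pvHours "venerdì" = 6 := by decide

-- ===== VERDICT (by name: the statement is the Claim_ definition above) =====
theorem calcola_giorni_assenza_spec : Claim_equal_calcola_giorni_assenza := by
  intro ore _
  show calcola_giorni_assenza ore = calcola_giorni_assenza_alt ore
  by_cases h1 : (5:Int) ≤ ore <;> by_cases h2 : (10:Int) ≤ ore <;>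
    by_cases h3 : (14:Int) ≤ ore <;> by_cases h4 : (20:Int) ≤ ore <;>
    by_cases h5 : (26:Int) ≤ ore <;>
    simp only [calcola_giorni_assenza, calcola_giorni_assenza_alt, pvLoopA, pvCum,
      pvHours_lun, pvHours_mar, pvHours_mer, pvHours_gio, pvHours_ven,
      List.filter, PySem.List.pyGet?, PySem.List.pyIdx?] <;>
    try norm_num [h1, h2, h3, h4, h5]
  all_goals try split_ifs <;> simp_all
  all_goals omega
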